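-- pv_equiv track=rewrite | github.com/srikanrk/aws-wa-sagemaker-mcp | awslabs/sagemaker_wa_mcp_server/report_generator.py | _console_url
-- ===== SOURCE A (Python) =====
-- def _console_url(resource_name: str, region: str = 'us-east-1') -> str:
--     """Build an AWS Console URL for a SageMaker resource.
--
--     Args:
--         resource_name: Resource name, possibly prefixed with type
--         region: AWS region
--
--     Returns:
--         Console URL string
--     """
--     path_map = {
--         'endpoint': 'endpoints',
--         'training_job': 'jobs',
--         'notebook': 'notebook-instances',
--         'model': 'models',
--     }
--     for prefix, path in path_map.items():
--         if resource_name.startswith(f'{prefix}/'):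
--             clean = resource_name[len(prefix) + 1 :]
--             return f'https://{region}.console.aws.amazon.com/sagemaker/home?region={region}#/{path}/{clean}'
--     return '#'
-- ===== SOURCE B (Python) =====
-- def _console_url(resource_name: str, region: str = 'us-east-1') -> str:
--     """Build an AWS Console URL for a SageMaker resource (split once, one lookup)."""
--     path_map = {
--         'endpoint': 'endpoints',
--         'training_job': 'jobs',
--         'notebook': 'notebook-instances',
--         'model': 'models',
--     }
--     i = resource_name.find('/')
--     if i < 0:
--         return '#'
--     path = path_map.get(resource_name[:i])
--     if path is None:
--         return '#'
--     return f'https://{region}.console.aws.amazon.com/sagemaker/home?region={region}#/{path}/{resource_name[i + 1:]}'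
-- ===== Notes on version B (the rewrite author's own statement) =====
-- stated objective: alternative
-- what changed: B replaces A's loop over path_map testing startswith for each prefix by computing the first '/' position once, then doing a single dict lookup on the part before it.
import Mathlib
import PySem

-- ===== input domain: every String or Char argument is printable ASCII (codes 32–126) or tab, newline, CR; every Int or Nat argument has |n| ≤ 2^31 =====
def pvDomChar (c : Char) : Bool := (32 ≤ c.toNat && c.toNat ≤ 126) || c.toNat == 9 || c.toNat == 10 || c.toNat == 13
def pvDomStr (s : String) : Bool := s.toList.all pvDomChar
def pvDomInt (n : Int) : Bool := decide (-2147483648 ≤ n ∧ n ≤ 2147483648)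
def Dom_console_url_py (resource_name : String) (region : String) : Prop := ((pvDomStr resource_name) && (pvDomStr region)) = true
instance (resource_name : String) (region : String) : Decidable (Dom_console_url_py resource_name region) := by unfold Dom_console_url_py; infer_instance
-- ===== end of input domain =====

-- B replaces A's startswith-scan over the path map by locating the first '/' once and doing a single dict lookup (alternative decomposition; equal return values proved).

-- ===== PORT A =====
-- the loop 'for prefix, path in path_map.items(): …' with its early return
def consoleLoopA (resource_name : String) (region : String) : List (String × String) → String
  | [] => "#"
  | (pre, path) :: rest =>
    if PySem.Str.startswith resource_name (pre ++ "/") then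
      "https://" ++ region ++ ".console.aws.amazon.com/sagemaker/home?region=" ++ region
        ++ "#/" ++ path ++ "/"
        ++ PySem.Str.slice resource_name (some ((PySem.Str.len pre : Int) + 1)) none
    else consoleLoopA resource_name region rest

def console_url_py (resource_name : String) (region : String) : String :=
  let path_map : PySem.Dict String String := PySem.Dict.mk
    [("endpoint", "endpoints"), ("training_job", "jobs"),
     ("notebook", "notebook-instances"), ("model", "models")]
  consoleLoopA resource_name region (PySem.Dict.items path_map)

-- ===== PORT B =====
def console_url_py_alt (resource_name : String) (region : String) : String :=
  let path_map : PySem.Dict String String := PySem.Dict.mk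
    [("endpoint", "endpoints"), ("training_job", "jobs"),
     ("notebook", "notebook-instances"), ("model", "models")]
  let i := PySem.Str.find resource_name "/"
  if i < 0 then "#"
  else
    match PySem.Dict.get? path_map (PySem.Str.slice resource_name none (some i)) with
    | none => "#"
    | some path =>
        "https://" ++ region ++ ".console.aws.amazon.com/sagemaker/home?region=" ++ region
          ++ "#/" ++ path ++ "/"
          ++ PySem.Str.slice resource_name (some (i + 1)) none

-- ===== PRECONDITION & SPEC =====
def Spec_console_url_py (resource_name : String) (region : String) (out : String) : Prop := out = console_url_py_alt resource_name region
instance (resource_name : String) (region : String) (out : String) : Decidable (Spec_console_url_py resource_name region out) := by unfold Spec_console_url_py; infer_instance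

-- ===== CLAIM (what is proved, stated in full; the proofs are below) =====
def Claim_equal_console_url_py : Prop := ∀ (resource_name : String) (region : String), Dom_console_url_py resource_name region → Spec_console_url_py resource_name region (console_url_py resource_name region)

-- ===== LEMMAS AND PROOFS =====

theorem key_slash_prefix (key pre rest : List Char) (hk : '/' ∉ key) (hp : '/' ∉ pre) :
    (key ++ ['/']) <+: (pre ++ '/' :: rest) ↔ key = pre := by
  induction key generalizing pre with
  | nil =>
    cases pre with
    | nil => simp
    | cons c cs =>
      simp only [List.nil_append, List.cons_append, List.cons_prefix_cons]
      simp only [List.mem_cons, not_or] at hp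
      constructor
      · rintro ⟨h, -⟩; exact absurd h hp.1
      · intro h; simp at h
  | cons k ks ih =>
    simp only [List.mem_cons, not_or] at hk
    cases pre with
    | nil =>
      simp only [List.nil_append, List.cons_append, List.cons_prefix_cons]
      constructor
      · rintro ⟨h, -⟩; exact absurd h.symm hk.1
      · intro h; simp at h
    | cons c cs =>
      simp only [List.mem_cons, not_or] at hp
      simp only [List.cons_append, List.cons_prefix_cons, ih cs hk.2 hp.2]
      constructor
      · rintro ⟨h1, h2⟩; rw [h1, h2]
      · intro h; injection h with h1 h2; exact ⟨h1, h2⟩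

theorem core (s r : String) : console_url_py s r = console_url_py_alt s r := by
  unfold console_url_py console_url_py_alt
  by_cases hneg : PySem.Str.find s "/" < 0
  case pos =>
    rw [if_pos hneg]
    have hfind : PySem.Chars.find s.toList ['/'] = -1 := by
      have hle := PySem.Chars.neg_one_le_find s.toList ['/']
      simp only [PySem.Str.find_eq] at hneg
      have : ("/" : String).toList = ['/'] := by decide
      rw [this] at hneg
      omega
    have hmem : '/' ∉ s.toList := by
      intro hm
      exact (PySem.Chars.find_eq_neg_one_iff _ _).mp hfind
        ((List.singleton_infix_iff _ _).mpr hm)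
    have hsw : ∀ p : List Char, '/' ∈ p → PySem.Chars.startswith s.toList p = false := by
      intro p hp
      rw [Bool.eq_false_iff]
      intro htrue
      simp only [PySem.Chars.startswith] at htrue
      have hpre := List.isPrefixOf_iff_prefix.mp htrue
      exact hmem (hpre.subset hp)
    simp [consoleLoopA,
      hsw ['e','n','d','p','o','i','n','t','/'] (by decide),
      hsw ['t','r','a','i','n','i','n','g','_','j','o','b','/'] (by decide),
      hsw ['n','o','t','e','b','o','o','k','/'] (by decide),
      hsw ['m','o','d','e','l','/'] (by decide)]
  case neg =>
    rw [if_neg hneg]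
    simp only [PySem.Str.find_eq, show ("/" : String).toList = ['/'] from by decide] at hneg ⊢
    set f := PySem.Chars.find s.toList ['/'] with hf
    have hf0 : 0 ≤ f := by omega
    set n := f.toNat with hn
    have hfn : f = (n : Int) := (Int.toNat_of_nonneg hf0).symm
    obtain ⟨hpre, hmin⟩ := PySem.Chars.find_spec (s := s.toList) (sub := ['/']) hf0
    have hlt : n < s.toList.length := by
      by_contra hge
      have : s.toList.drop n = [] := List.drop_eq_nil_of_le (by omega)
      rw [this] at hpre
      simp at hpre
    have hgetn : s.toList[n] = '/' := by
      have := List.drop_eq_getElem_cons hlt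
      rw [this] at hpre
      exact (List.cons_prefix_cons.mp hpre).1.symm
    have hdecomp : s.toList = s.toList.take n ++ '/' :: s.toList.drop (n + 1) := by
      conv_lhs => rw [← List.take_append_drop n s.toList]
      rw [List.drop_eq_getElem_cons hlt, hgetn]
    have hnoslash : '/' ∉ s.toList.take n := by
      intro hm
      obtain ⟨j, hjlt, hj⟩ := List.getElem_of_mem hm
      have hjn : j < n := by
        have := List.length_take_le n s.toList
        omega
      rw [List.getElem_take] at hj
      refine hmin j hjn ?_
      rw [List.drop_eq_getElem_cons (by omega), hj]
      simp
    have htake : (s.toList.take n).length = n := by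
      rw [List.length_take]; omega
    -- startswith characterization, for each slash-free key
    have hsw : ∀ key : List Char, '/' ∉ key →
        PySem.Chars.startswith s.toList (key ++ ['/']) = decide (s.toList.take n = key) := by
      intro key hk
      simp only [PySem.Chars.startswith]
      rw [Bool.eq_iff_iff]
      simp only [List.isPrefixOf_iff_prefix, decide_eq_true_eq]
      conv_lhs => rw [hdecomp]
      rw [key_slash_prefix key _ _ hk hnoslash]
      exact eq_comm
    -- B's lookup argument
    have hslice : (PySem.Str.slice s none (some f)).toList = s.toList.take n := by
      rw [PySem.Str.toList_slice, PySem.Chars.slice_eq_listSlice, hfn,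
        PySem.List.slice_to_natCast]
    have hq : ∀ (t : String) (L : List Char), t.toList = L →
        (t == PySem.Str.slice s none (some f)) = decide (s.toList.take n = L) := by
      intro t L hL
      rw [Bool.eq_iff_iff]
      simp only [beq_iff_eq, decide_eq_true_eq]
      rw [← String.toList_inj, hslice, hL]
      exact eq_comm
    have e1 := hsw ['e','n','d','p','o','i','n','t'] (by decide)
    have e2 := hsw ['t','r','a','i','n','i','n','g','_','j','o','b'] (by decide)
    have e3 := hsw ['n','o','t','e','b','o','o','k'] (by decide)
    have e4 := hsw ['m','o','d','e','l'] (by decide)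
    simp only [List.cons_append, List.nil_append] at e1 e2 e3 e4
    have q1 := hq "endpoint" ['e','n','d','p','o','i','n','t'] (by decide)
    have q2 := hq "training_job" ['t','r','a','i','n','i','n','g','_','j','o','b'] (by decide)
    have q3 := hq "notebook" ['n','o','t','e','b','o','o','k'] (by decide)
    have q4 := hq "model" ['m','o','d','e','l'] (by decide)
    simp only [consoleLoopA, PySem.Dict.get?_mk_cons, q1, q2, q3, q4]
    simp only [PySem.Str.startswith_eq, String.toList_append] at *
    simp only [show ("endpoint" : String).toList ++ ("/" : String).toList = ['e','n','d','p','o','i','n','t','/'] from rfl,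
      show ("training_job" : String).toList ++ ("/" : String).toList = ['t','r','a','i','n','i','n','g','_','j','o','b','/'] from rfl,
      show ("notebook" : String).toList ++ ("/" : String).toList = ['n','o','t','e','b','o','o','k','/'] from rfl,
      show ("model" : String).toList ++ ("/" : String).toList = ['m','o','d','e','l','/'] from rfl,
      show ((PySem.Str.len "endpoint" : Int) + 1) = 9 from rfl,
      show ((PySem.Str.len "training_job" : Int) + 1) = 13 from rfl,
      show ((PySem.Str.len "notebook" : Int) + 1) = 9 from rfl,
      show ((PySem.Str.len "model" : Int) + 1) = 6 from rfl]
    rw [e1, e2, e3, e4]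
    split_ifs with h1 h2 h3 h4
    · have hn8 : n = 8 := by rw [← htake, of_decide_eq_true h1]; rfl
      rw [hfn, hn8]
      norm_num
    · have hn13 : n = 12 := by rw [← htake, of_decide_eq_true h2]; rfl
      rw [hfn, hn13]
      norm_num
    · have hn8 : n = 8 := by rw [← htake, of_decide_eq_true h3]; rfl
      rw [hfn, hn8]
      norm_num
    · have hn5 : n = 5 := by rw [← htake, of_decide_eq_true h4]; rfl
      rw [hfn, hn5]
      norm_num
    · simp [PySem.Dict.get?]

-- ===== VERDICT (by name: the statement is the Claim_ definition above) =====
theorem console_url_py_spec : Claim_equal_console_url_py := by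
  intro s r _
  unfold Spec_console_url_py
  exact core s r
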